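-- pv_equiv track=rewrite | github.com/YingtongBu/insight_nlp | CRF/BasicCRF/DataProcessing.py | get_longest_label
-- ===== SOURCE A (Python) =====
-- def get_longest_label(X, Y):
--   n = len(Y)
--   current_len = 0
--   max_len = 0
--   prev_index = -2
--   current_start = -1
--   max_start = -1
--
--   for i in range(n):
--     if Y[i] == "Y":
--       if prev_index == i - 1:
--         current_len += 1
--         prev_index = i
--       else:
--         prev_index = i
--         current_len = 1
--         current_start = i
--       if current_len > max_len:
--         max_len = current_len
--         max_start = current_start
--
--   if max_start == -1:
--     return ''
--   else:
--     return ''.join(X[max_start:(max_start + max_len)])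
-- ===== SOURCE B (Python) =====
-- def get_longest_label(X, Y):
--   # Build the list of maximal "Y"-runs as (start, length), then take the first longest.
--   runs = []
--   start = None
--   for i, lab in enumerate(Y):
--     if lab == "Y":
--       if start is None:
--         start = i
--     elif start is not None:
--       runs.append((start, i - start))
--       start = None
--   if start is not None:
--     runs.append((start, len(Y) - start))
--   if not runs:
--     return ''
--   best = max(runs, key=lambda r: r[1])
--   s, l = best
--   return ''.join(X[s:s + l])
-- ===== Notes on version B (the rewrite author's own statement) =====
-- stated objective: alternative
-- what changed: B first materialises the list of maximal "Y"-runs as (start, length) pairs in one scan and then picks the first longest run with max(key=length), instead of A's incremental prev_index/current_len/max_len best-so-far bookkeeping inside the scan.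
import Mathlib
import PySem

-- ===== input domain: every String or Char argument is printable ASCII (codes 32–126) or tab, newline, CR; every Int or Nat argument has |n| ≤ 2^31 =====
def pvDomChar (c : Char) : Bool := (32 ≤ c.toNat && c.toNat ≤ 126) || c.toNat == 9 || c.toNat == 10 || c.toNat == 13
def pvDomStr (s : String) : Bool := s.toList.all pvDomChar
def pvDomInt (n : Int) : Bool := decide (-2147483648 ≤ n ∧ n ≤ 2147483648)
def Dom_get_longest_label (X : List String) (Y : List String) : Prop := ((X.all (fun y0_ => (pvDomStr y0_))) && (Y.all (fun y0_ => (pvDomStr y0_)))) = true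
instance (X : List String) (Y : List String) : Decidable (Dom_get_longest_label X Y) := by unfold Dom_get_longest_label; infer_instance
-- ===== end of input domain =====

-- B builds the list of maximal "Y"-runs first and then picks the first longest with max,
-- instead of A's incremental prev_index/current_len best-tracking; same cost, alternative decomposition.

-- ===== PORT A =====
-- loop body of A: state (current_len, max_len, prev_index, current_start, max_start)
def gllBodyA (st : Int × Int × Int × Int × Int) (i : Int) (lab : String) : Int × Int × Int × Int × Int :=
  if lab == "Y" then
    let cl := if st.2.2.1 == i - 1 then st.1 + 1 else 1
    let cs := if st.2.2.1 == i - 1 then st.2.2.2.1 else i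
    if cl > st.2.1 then (cl, cl, i, cs, cs) else (cl, st.2.1, i, cs, st.2.2.2.2)
  else st

def get_longest_label (X : List String) (Y : List String) : String :=
  let n : Int := PySem.List.len Y
  let st := (PySem.List.pyRange 0 n 1).foldl
    (fun st i => gllBodyA st i (PySem.List.pyGetD Y i "")) (0, 0, -2, -1, -1)
  if st.2.2.2.2 == -1 then ""
  else PySem.Str.join "" (PySem.List.slice X (some st.2.2.2.2) (some (st.2.2.2.2 + st.2.1)))

-- ===== PORT B =====
-- loop body of B: state (runs so far, start of the open run if any)
def gllBodyB (acc : List (Int × Int) × Option Int) (p : Int × String) : List (Int × Int) × Option Int :=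
  if p.2 == "Y" then
    match acc.2 with
    | none => (acc.1, some p.1)
    | some s => (acc.1, some s)
  else
    match acc.2 with
    | some s => (acc.1 ++ [(s, p.1 - s)], none)
    | none => acc

def get_longest_label_alt (X : List String) (Y : List String) : String :=
  let acc := (PySem.List.enumerate Y 0).foldl gllBodyB ([], none)
  let runs := match acc.2 with
    | some s => acc.1 ++ [(s, PySem.List.len Y - s)]
    | none => acc.1
  match PySem.List.max? runs (fun r => r.2) with
  | none => ""
  | some best => PySem.Str.join "" (PySem.List.slice X (some best.1) (some (best.1 + best.2)))

-- ===== PRECONDITION & SPEC =====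
def Spec_get_longest_label (X : List String) (Y : List String) (out : String) : Prop := out = get_longest_label_alt X Y
instance (X : List String) (Y : List String) (out : String) : Decidable (Spec_get_longest_label X Y out) := by unfold Spec_get_longest_label; infer_instance

-- ===== CLAIM (what is proved, stated in full; the proofs are below) =====
def Claim_equal_get_longest_label : Prop := ∀ (X : List String) (Y : List String), Dom_get_longest_label X Y → Spec_get_longest_label X Y (get_longest_label X Y)

-- ===== LEMMAS AND PROOFS =====

-- the effective run list: closed runs plus the open run (if any) cut at index i
def gllRcur (runs : List (Int × Int)) (start : Option Int) (i : Int) : List (Int × Int) :=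
  runs ++ (match start with | some s => [(s, i - s)] | none => [])

def gllStepM (acc : Option (Int × Int)) (r : Int × Int) : Option (Int × Int) :=
  match acc with | none => some r | some m => if m.2 < r.2 then some r else some m

lemma gllMax?_eq_foldl (rs : List (Int × Int)) :
    PySem.List.max? rs (fun r => r.2) = rs.foldl gllStepM none := by
  simp only [PySem.List.max?]
  congr 1
  funext acc x
  cases acc <;> rfl

-- invariant tying A's five-register state to B's (runs, open-start) state at index i
def gllInv (i : Int) (st : Int × Int × Int × Int × Int) (acc : List (Int × Int) × Option Int) : Prop :=
  match st, acc with
  | (cl, ml, pi, cs, ms), (runs, start) =>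
    0 ≤ i ∧
    (match PySem.List.max? (gllRcur runs start i) (fun r => r.2) with
     | none => ms = -1 ∧ ml = 0
     | some b => ms = b.1 ∧ ml = b.2) ∧
    (match start with
     | some s => pi = i - 1 ∧ cs = s ∧ cl = i - s ∧ 0 ≤ s ∧ s < i
     | none => pi < i - 1) ∧
    (∀ r ∈ runs, 1 ≤ r.2 ∧ 0 ≤ r.1)

lemma gllFoldM_mem {runs : List (Int × Int)} {m : Int × Int}
    (h : runs.foldl gllStepM none = some m) : m ∈ runs := by
  apply PySem.List.max?_mem (key := fun r : Int × Int => r.2)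
  rw [gllMax?_eq_foldl]; exact h

lemma gllInv_step (i : Int) (y : String) (st : Int × Int × Int × Int × Int)
    (acc : List (Int × Int) × Option Int) (h : gllInv i st acc) :
    gllInv (i + 1) (gllBodyA st i y) (gllBodyB acc (i, y)) := by
  obtain ⟨cl, ml, pi, cs, ms⟩ := st
  obtain ⟨runs, start⟩ := acc
  by_cases hY : y = "Y"
  · subst hY
    cases start with
    | some s =>
      simp only [gllInv, gllRcur, gllMax?_eq_foldl, List.foldl_append, List.foldl_cons,
        List.foldl_nil] at h
      obtain ⟨hi, hmax, ⟨hpi, hcs, hcl, hs0, hsi⟩, hruns⟩ := h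
      have hbeq : (pi == i - 1) = true := by simp [hpi]
      simp [gllBodyA, gllBodyB, hbeq]
      split_ifs with hgt
      all_goals
        simp only [gllInv, gllRcur, gllMax?_eq_foldl, List.foldl_append, List.foldl_cons,
          List.foldl_nil]
        cases hM : List.foldl gllStepM none runs with
        | none =>
          rw [hM] at hmax
          obtain ⟨hms, hml⟩ := hmax
          simp only [gllStepM]
          refine ⟨?_, ⟨?_, ?_⟩, ⟨?_, ?_, ?_, ?_, ?_⟩, hruns⟩ <;> first | trivial | omega
        | some m =>
          rw [hM] at hmax
          have hm2 := hruns m (gllFoldM_mem hM)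
          simp only [gllStepM] at hmax ⊢
          by_cases h2 : m.2 < i + 1 - s
          · simp only [if_pos h2]
            by_cases h1 : m.2 < i - s
            · rw [if_pos h1] at hmax
              obtain ⟨hms, hml⟩ := hmax
              refine ⟨?_, ⟨?_, ?_⟩, ⟨?_, ?_, ?_, ?_, ?_⟩, hruns⟩ <;> first | trivial | omega
            · rw [if_neg h1] at hmax
              obtain ⟨hms, hml⟩ := hmax
              refine ⟨?_, ⟨?_, ?_⟩, ⟨?_, ?_, ?_, ?_, ?_⟩, hruns⟩ <;> first | trivial | omega
          · have h1 : ¬ m.2 < i - s := by omega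
            rw [if_neg h1] at hmax
            obtain ⟨hms, hml⟩ := hmax
            simp only [if_neg h2]
            refine ⟨?_, ⟨?_, ?_⟩, ⟨?_, ?_, ?_, ?_, ?_⟩, hruns⟩ <;> first | trivial | omega
    | none =>
      simp only [gllInv, gllRcur, gllMax?_eq_foldl, List.append_nil] at h
      obtain ⟨hi, hmax, hst, hruns⟩ := h
      have hbeq : (pi == i - 1) = false := by
        have hne : pi ≠ i - 1 := by omega
        simp [hne]
      simp [gllBodyA, gllBodyB, hbeq]
      split_ifs with hgt
      all_goals
        simp only [gllInv, gllRcur, gllMax?_eq_foldl, List.foldl_append, List.foldl_cons,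
          List.foldl_nil]
        cases hM : List.foldl gllStepM none runs with
        | none =>
          rw [hM] at hmax
          obtain ⟨hms, hml⟩ := hmax
          simp only [gllStepM]
          refine ⟨?_, ⟨?_, ?_⟩, ⟨?_, ?_, ?_, ?_, ?_⟩, hruns⟩ <;> first | trivial | omega
        | some m =>
          rw [hM] at hmax
          obtain ⟨hms, hml⟩ := hmax
          have hm2 := hruns m (gllFoldM_mem hM)
          simp only [gllStepM]
          have h2 : ¬ m.2 < i + 1 - i := by omega
          simp only [if_neg h2]
          refine ⟨?_, ⟨?_, ?_⟩, ⟨?_, ?_, ?_, ?_, ?_⟩, hruns⟩ <;> first | trivial | omega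
  · have hbeq : (y == "Y") = false := by simp [hY]
    simp [gllBodyA, gllBodyB, hbeq]
    cases start with
    | some s =>
      simp only [gllInv, gllRcur, gllMax?_eq_foldl, List.foldl_append, List.foldl_cons,
        List.foldl_nil] at h
      obtain ⟨hi, hmax, ⟨hpi, hcs, hcl, hs0, hsi⟩, hruns⟩ := h
      simp only [gllInv, gllRcur, gllMax?_eq_foldl, List.append_nil, List.foldl_append,
        List.foldl_cons, List.foldl_nil]
      refine ⟨by omega, hmax, by omega, ?_⟩
      intro r hr
      rcases List.mem_append.mp hr with hr | hr
      · exact hruns r hr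
      · simp only [List.mem_singleton] at hr
        subst hr
        exact ⟨by omega, by omega⟩
    | none =>
      simp only [gllInv, gllRcur, gllMax?_eq_foldl, List.append_nil] at h
      obtain ⟨hi, hmax, hst, hruns⟩ := h
      simp only [gllInv, gllRcur, gllMax?_eq_foldl, List.append_nil]
      exact ⟨by omega, hmax, by omega, hruns⟩

lemma gllInv_loop (ys : List String) : ∀ (i : Int) st acc, gllInv i st acc →
    gllInv (i + ys.length)
      ((PySem.List.enumerate ys i).foldl (fun s p => gllBodyA s p.1 p.2) st)
      ((PySem.List.enumerate ys i).foldl gllBodyB acc) := by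
  induction ys with
  | nil => intro i st acc h; simpa [PySem.List.enumerate_nil] using h
  | cons y ys ih =>
    intro i st acc h
    have h' := ih (i + 1) _ _ (gllInv_step i y st acc h)
    rw [PySem.List.enumerate_cons]
    simp only [List.foldl_cons]
    have : i + ((y :: ys).length : Int) = (i + 1) + (ys.length : Int) := by
      push_cast [List.length_cons]; ring
    rw [this]
    exact h'

lemma gllA_fold_eq (Y : List String) (init : Int × Int × Int × Int × Int) :
    (PySem.List.pyRange 0 (Y.length : Int) 1).foldl
      (fun st i => gllBodyA st i (PySem.List.pyGetD Y i "")) init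
    = (PySem.List.enumerate Y 0).foldl (fun s p => gllBodyA s p.1 p.2) init := by
  rw [PySem.List.enumerate_eq_map_pyRange (d := ""), List.foldl_map]
  simp only [PySem.List.len_eq]

-- ===== VERDICT (by name: the statement is the Claim_ definition above) =====
theorem get_longest_label_spec : Claim_equal_get_longest_label := by
  intro X Y _
  unfold Spec_get_longest_label get_longest_label get_longest_label_alt
  simp only [PySem.List.len_eq]
  rw [gllA_fold_eq]
  have h0 : gllInv 0 (0, 0, -2, -1, -1) ([], none) := by
    simp only [gllInv, gllRcur, gllMax?_eq_foldl, List.append_nil, List.foldl_nil]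
    exact ⟨by omega, ⟨trivial, trivial⟩, by omega, by simp⟩
  have h := gllInv_loop Y 0 (0, 0, -2, -1, -1) ([], none) h0
  rw [zero_add] at h
  generalize hA : (PySem.List.enumerate Y 0).foldl (fun s p => gllBodyA s p.1 p.2) ((0 : Int), (0 : Int), (-2 : Int), (-1 : Int), (-1 : Int)) = stA at h ⊢
  generalize hB : (PySem.List.enumerate Y 0).foldl gllBodyB (([] : List (Int × Int)), (none : Option Int)) = accB at h ⊢
  obtain ⟨cl, ml, pi, cs, ms⟩ := stA
  obtain ⟨runs, start⟩ := accB
  simp only [gllInv, gllRcur, gllMax?_eq_foldl] at h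
  obtain ⟨hi, hmax, hst, hruns⟩ := h
  cases start with
  | some s =>
    obtain ⟨hpi, hcs, hcl, hs0, hsi⟩ := hst
    simp only [gllMax?_eq_foldl]
    cases hM : List.foldl gllStepM none (runs ++ [(s, (Y.length : Int) - s)]) with
    | none =>
      rw [hM] at hmax
      obtain ⟨hms, hml⟩ := hmax
      simp [hms]
    | some b =>
      rw [hM] at hmax
      obtain ⟨hms, hml⟩ := hmax
      have hb1 : 0 ≤ b.1 := by
        rcases List.mem_append.mp (gllFoldM_mem hM) with h' | h'
        · exact (hruns b h').2
        · simp only [List.mem_singleton] at h'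
          subst h'
          exact hs0
      have hne : (ms == -1) = false := by
        have : ms ≠ -1 := by omega
        simp [this]
      simp only [hne, Bool.false_eq_true, if_false]
      rw [hms, hml]
  | none =>
    simp only [List.append_nil] at hmax
    simp only [gllMax?_eq_foldl]
    cases hM : List.foldl gllStepM none runs with
    | none =>
      rw [hM] at hmax
      obtain ⟨hms, hml⟩ := hmax
      simp [hms]
    | some b =>
      rw [hM] at hmax
      obtain ⟨hms, hml⟩ := hmax
      have hb1 : 0 ≤ b.1 := (hruns b (gllFoldM_mem hM)).2
      have hne : (ms == -1) = false := by
        have : ms ≠ -1 := by omega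
        simp [this]
      simp only [hne, Bool.false_eq_true, if_false]
      rw [hms, hml]
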